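-- pv_equiv track=rewrite | github.com/zaraujoz/MAPReduce | MAPReduce.py | mapper
-- ===== SOURCE A (Python) =====
-- def mapper(text):
--     text = text.lower().strip()
--     text = ''.join([c for c in text if c.isalpha() or c.isspace()])
--
--     words = text.split()
--
--     word_counts = []
--     for word in words:
--         word_counts.append((word, 1))
--
--     return word_counts
-- ===== SOURCE B (Python) =====
-- def mapper(text):
--     word_counts = []
--     buf = []
--     for c in text.lower():
--         if c.isspace():
--             if buf:
--                 word_counts.append((''.join(buf), 1))
--                 buf = []
--         elif c.isalpha():
--             buf.append(c)
--         # other characters are skipped without flushing the buffer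
--     if buf:
--         word_counts.append((''.join(buf), 1))
--     return word_counts
-- ===== Notes on version B (the rewrite author's own statement) =====
-- stated objective: alternative
-- what changed: Replaces A's four passes (strip, filter+join, split, pairing loop) by one stateful scan over the lowered text that builds words in a buffer and emits (word, 1) on whitespace.
import Mathlib
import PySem

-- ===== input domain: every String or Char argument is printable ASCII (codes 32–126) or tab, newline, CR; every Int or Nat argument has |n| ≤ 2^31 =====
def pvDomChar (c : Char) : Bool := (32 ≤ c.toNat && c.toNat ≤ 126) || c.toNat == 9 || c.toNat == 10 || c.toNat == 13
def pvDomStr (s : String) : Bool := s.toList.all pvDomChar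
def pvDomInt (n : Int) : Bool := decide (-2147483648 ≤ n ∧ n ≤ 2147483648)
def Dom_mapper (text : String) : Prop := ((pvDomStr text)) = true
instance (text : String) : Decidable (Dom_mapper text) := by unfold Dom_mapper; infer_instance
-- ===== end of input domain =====

-- B fuses A's strip/filter+join/split/pairing-loop passes into one stateful scan (objective: alternative, one pass instead of four).

-- ===== PORT A =====
def mapper (text : String) : List (String × Int) :=
  -- text = text.lower().strip()
  let t1 : List Char := (PySem.Str.strip (PySem.Str.lower text)).toList
  -- text = ''.join([c for c in text if c.isalpha() or c.isspace()])
  let t2 : List Char :=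
    PySem.Chars.join [] ((t1.filter (fun c => PySem.Chars.isalpha c || PySem.Chars.isspace c)).map (fun c => [c]))
  -- words = text.split()
  let words : List (List Char) := PySem.Chars.split₀ t2
  -- for word in words: word_counts.append((word, 1))
  words.foldl (fun acc w => acc ++ [(String.ofList w, (1 : Int))]) []

-- ===== PORT B =====
-- one step of the scan: state = (word_counts so far, current buffer)
def mapperAltStep (st : List (String × Int) × List Char) (c : Char) :
    List (String × Int) × List Char :=
  if PySem.Chars.isspace c then
    if st.2.isEmpty then st else (st.1 ++ [(String.ofList st.2, (1 : Int))], [])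
  else if PySem.Chars.isalpha c then (st.1, st.2 ++ [c])
  else st

def mapper_alt (text : String) : List (String × Int) :=
  let st := (PySem.Str.lower text).toList.foldl mapperAltStep ([], [])
  if st.2.isEmpty then st.1 else st.1 ++ [(String.ofList st.2, (1 : Int))]

-- ===== PRECONDITION & SPEC =====
def Spec_mapper (text : String) (out : List (String × Int)) : Prop := out = mapper_alt text
instance (text : String) (out : List (String × Int)) : Decidable (Spec_mapper text out) := by unfold Spec_mapper; infer_instance

-- ===== CLAIM (what is proved, stated in full; the proofs are below) =====
def Claim_equal_mapper : Prop := ∀ (text : String), Dom_mapper text → Spec_mapper text (mapper text)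

-- ===== LEMMAS AND PROOFS =====

-- character predicate kept by A's filter
def pvKeep (c : Char) : Bool := PySem.Chars.isalpha c || PySem.Chars.isspace c

lemma pvKeep_of_space {c : Char} (h : PySem.Chars.isspace c = true) : pvKeep c = true := by
  simp [pvKeep, h]

-- defining equations of split₀.go (rfl), to avoid unfolding the brecOn form
lemma go_nil (cur : List Char) (acc : List (List Char)) :
    PySem.Chars.split₀.go [] cur acc =
      (if cur.isEmpty then acc.reverse else (cur.reverse :: acc).reverse) := rfl

lemma go_cons (c : Char) (rest cur : List Char) (acc : List (List Char)) :
    PySem.Chars.split₀.go (c :: rest) cur acc =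
      (if PySem.Chars.isspace c then
        (if cur.isEmpty then PySem.Chars.split₀.go rest [] acc
         else PySem.Chars.split₀.go rest [] (cur.reverse :: acc))
       else PySem.Chars.split₀.go rest (c :: cur) acc) := rfl

-- split₀.go with a nonempty accumulator just prepends the reversed accumulator
lemma go_acc (s : List Char) : ∀ cur acc,
    PySem.Chars.split₀.go s cur acc = acc.reverse ++ PySem.Chars.split₀.go s cur [] := by
  induction s with
  | nil =>
      intro cur acc
      by_cases h : cur.isEmpty <;> simp [go_nil, h]
  | cons c rest ih =>
      intro cur acc
      by_cases hs : PySem.Chars.isspace c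
      · by_cases h : cur.isEmpty
        · simp only [go_cons, hs, h, if_true]
          exact ih [] acc
        · simp only [go_cons, hs, h, Bool.false_eq_true, if_false, if_true]
          rw [ih [] (cur.reverse :: acc), ih [] [cur.reverse]]
          simp
      · simp only [go_cons, hs, Bool.false_eq_true, if_false]
        exact ih (c :: cur) acc

-- split₀.go on an all-space list just flushes the buffer
lemma go_spaces {sp : List Char} (h : ∀ c ∈ sp, PySem.Chars.isspace c = true) :
    ∀ cur acc, PySem.Chars.split₀.go sp cur acc =
      (if cur.isEmpty then acc.reverse else (cur.reverse :: acc).reverse) := by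
  induction sp with
  | nil => intro cur acc; exact go_nil cur acc
  | cons c rest ih =>
      intro cur acc
      have hc : PySem.Chars.isspace c = true := h c (List.mem_cons_self ..)
      have hr : ∀ x ∈ rest, PySem.Chars.isspace x = true := fun x hx => h x (List.mem_cons_of_mem _ hx)
      by_cases hcur : cur.isEmpty <;> simp [go_cons, hc, hcur, ih hr]

-- trailing whitespace does not change split₀.go
lemma go_append_spaces (xs : List Char) {sp : List Char}
    (h : ∀ c ∈ sp, PySem.Chars.isspace c = true) :
    ∀ cur acc, PySem.Chars.split₀.go (xs ++ sp) cur acc = PySem.Chars.split₀.go xs cur acc := by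
  induction xs with
  | nil =>
      intro cur acc
      rw [List.nil_append, go_spaces h, go_nil]
  | cons c rest ih =>
      intro cur acc
      by_cases hs : PySem.Chars.isspace c
      · by_cases hcur : cur.isEmpty <;> simp [go_cons, hs, hcur, ih]
      · simp [go_cons, hs, ih]

-- leading whitespace does not change split₀
lemma split₀_spaces_append {sp : List Char} (h : ∀ c ∈ sp, PySem.Chars.isspace c = true)
    (xs : List Char) : PySem.Chars.split₀ (sp ++ xs) = PySem.Chars.split₀ xs := by
  induction sp with
  | nil => rfl
  | cons c rest ih =>
      have hc : PySem.Chars.isspace c = true := h c (List.mem_cons_self ..)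
      have hr : ∀ x ∈ rest, PySem.Chars.isspace x = true := fun x hx => h x (List.mem_cons_of_mem _ hx)
      simpa [PySem.Chars.split₀, go_cons, hc] using ih hr

-- the scan computes A's filter-then-split result, for any initial state
lemma scan_eq_go (cs : List Char) : ∀ (out : List (String × Int)) (buf : List Char),
    (let st := cs.foldl mapperAltStep (out, buf)
     if st.2.isEmpty then st.1 else st.1 ++ [(String.ofList st.2, (1 : Int))]) =
    out ++ (PySem.Chars.split₀.go (cs.filter pvKeep) buf.reverse []).map
      (fun w => (String.ofList w, (1 : Int))) := by
  induction cs with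
  | nil =>
      intro out buf
      by_cases h : buf.isEmpty
      · have : buf = [] := List.isEmpty_iff.mp h
        subst this
        simp [go_nil]
      · have hb : buf.reverse.isEmpty = false := by
          simp [List.isEmpty_iff] at h ⊢; exact h
        simp [go_nil, h, hb]
  | cons c rest ih =>
      intro out buf
      by_cases hs : PySem.Chars.isspace c
      · have hk : pvKeep c = true := pvKeep_of_space hs
        by_cases h : buf.isEmpty
        · have hbuf : buf = [] := List.isEmpty_iff.mp h
          subst hbuf
          simp only [List.foldl_cons, mapperAltStep, hs, if_true, List.isEmpty_nil,
            List.filter_cons, hk]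
          rw [ih out []]
          simp [go_cons, hs]
        · have hb : buf.reverse.isEmpty = false := by
            simp [List.isEmpty_iff] at h ⊢; exact h
          simp only [List.foldl_cons, mapperAltStep, hs, if_true, h, Bool.false_eq_true,
            if_false, List.filter_cons, hk]
          rw [ih (out ++ [(String.ofList buf, (1 : Int))]) []]
          simp only [go_cons, hs, if_true, hb, Bool.false_eq_true, if_false,
            List.reverse_nil, List.reverse_reverse]
          rw [go_acc (rest.filter pvKeep) [] [buf]]
          simp
      · by_cases ha : PySem.Chars.isalpha c
        · have hk : pvKeep c = true := by simp [pvKeep, ha]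
          simp only [List.foldl_cons, mapperAltStep, hs, Bool.false_eq_true, if_false, ha,
            if_true, List.filter_cons, hk]
          rw [ih out (buf ++ [c])]
          simp [go_cons, hs]
        · have hk : pvKeep c = false := by simp [pvKeep, ha, hs]
          simp only [List.foldl_cons, mapperAltStep, hs, Bool.false_eq_true, if_false, ha,
            List.filter_cons, hk]
          exact ih out buf

-- filtering with pvKeep keeps whitespace, so strip's removals reappear around the filtered core
lemma filter_strip (cs : List Char) :
    PySem.Chars.split₀ ((PySem.Chars.strip cs).filter pvKeep) =
    PySem.Chars.split₀ (cs.filter pvKeep) := by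
  have hdec : cs = cs.takeWhile PySem.Chars.isspace ++ PySem.Chars.lstrip cs := by
    simp [PySem.Chars.lstrip, List.takeWhile_append_dropWhile]
  have hsp1 : ∀ c ∈ cs.takeWhile PySem.Chars.isspace, PySem.Chars.isspace c = true :=
    fun c hc => List.mem_takeWhile_imp hc
  set ls := PySem.Chars.lstrip cs with hls
  have hdec2 : ls = PySem.Chars.strip cs ++ (ls.reverse.takeWhile PySem.Chars.isspace).reverse := by
    have : ls.reverse = ls.reverse.takeWhile PySem.Chars.isspace ++
        ls.reverse.dropWhile PySem.Chars.isspace := by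
      simp [List.takeWhile_append_dropWhile]
    conv_lhs => rw [← List.reverse_reverse ls, this]
    rw [List.reverse_append]
    congr 1
  have hsp2 : ∀ c ∈ (ls.reverse.takeWhile PySem.Chars.isspace).reverse,
      PySem.Chars.isspace c = true := by
    intro c hc
    exact List.mem_takeWhile_imp (List.mem_reverse.mp hc)
  have hfsp1 : (cs.takeWhile PySem.Chars.isspace).filter pvKeep = cs.takeWhile PySem.Chars.isspace :=
    List.filter_eq_self.mpr (fun c hc => pvKeep_of_space (hsp1 c hc))
  have hfsp2 : ((ls.reverse.takeWhile PySem.Chars.isspace).reverse).filter pvKeep =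
      (ls.reverse.takeWhile PySem.Chars.isspace).reverse :=
    List.filter_eq_self.mpr (fun c hc => pvKeep_of_space (hsp2 c hc))
  conv_rhs => rw [hdec]
  rw [List.filter_append, hfsp1, split₀_spaces_append hsp1]
  conv_rhs => rw [hdec2]
  rw [List.filter_append, hfsp2]
  unfold PySem.Chars.split₀
  rw [go_append_spaces _ hsp2]

-- ===== VERDICT (by name: the statement is the Claim_ definition above) =====
theorem mapper_spec : Claim_equal_mapper := by
  intro text _
  unfold Spec_mapper mapper mapper_alt
  rw [PySem.List.foldl_append_singleton_eq_map, PySem.Chars.join_nil_singletons]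
  rw [scan_eq_go]
  simp only [List.nil_append, List.reverse_nil]
  have : PySem.Chars.split₀.go ((PySem.Str.lower text).toList.filter pvKeep) [] [] =
      PySem.Chars.split₀ ((PySem.Str.lower text).toList.filter pvKeep) := rfl
  rw [this, ← filter_strip]
  have hb : (PySem.Str.strip (PySem.Str.lower text)).toList =
      PySem.Chars.strip (PySem.Str.lower text).toList := by
    simp [PySem.Str.toList_strip]
  rw [hb]
  rfl
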